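-- pv_equiv track=rewrite | github.com/Archerd6/Python-utiles | Scripts simples/1. Comprobar si dos cadenas son iguales sin importar mayúsculas.py | iguales
-- ===== SOURCE A (Python) =====
-- def iguales(primeraLista,segundaLista):
--     r=False
--     A=[]
--     B=[]
--
--     for i in range (len(primeraLista)):
--         A += (primeraLista[i].upper())
--
--     for i in range (len(segundaLista)):
--         B += (segundaLista[i].upper())
--
--     if (A == B):
--         r=True
--     return r
-- ===== SOURCE B (Python) =====
-- def iguales(primeraLista, segundaLista):
--     # Stream both character sequences lazily in lock-step and compare
--     # case-insensitively, stopping at the first mismatch; nothing is materialised.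
--     it_a = (c for s in primeraLista for c in s)
--     it_b = (c for s in segundaLista for c in s)
--     while True:
--         x = next(it_a, None)
--         y = next(it_b, None)
--         if x is None or y is None:
--             return x is None and y is None
--         if x.upper() != y.upper():
--             return False
-- ===== Notes on version B (the rewrite author's own statement) =====
-- stated objective: alternative
-- what changed: B replaces A's materialise-then-compare (building two flat uppercase char lists and testing list equality) with a lazy lock-step traversal of the two character streams via generators, comparing characters case-insensitively one at a time with early exit on the first mismatch and no intermediate lists.
import Mathlib
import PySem

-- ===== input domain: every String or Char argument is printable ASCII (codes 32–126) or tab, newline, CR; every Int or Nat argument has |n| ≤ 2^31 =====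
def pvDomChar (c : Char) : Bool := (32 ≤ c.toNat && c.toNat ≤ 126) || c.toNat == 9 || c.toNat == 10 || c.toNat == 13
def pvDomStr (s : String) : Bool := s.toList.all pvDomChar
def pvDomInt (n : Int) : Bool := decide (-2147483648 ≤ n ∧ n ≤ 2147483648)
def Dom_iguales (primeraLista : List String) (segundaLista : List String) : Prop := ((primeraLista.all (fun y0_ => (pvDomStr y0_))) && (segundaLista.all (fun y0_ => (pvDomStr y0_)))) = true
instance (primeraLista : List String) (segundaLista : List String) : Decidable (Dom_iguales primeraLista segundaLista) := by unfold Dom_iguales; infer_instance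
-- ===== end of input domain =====

-- B streams the two character sequences in lock-step with an early exit instead of
-- materialising A's two flat uppercase char lists ('alternative'; same O(n) cost).

-- ===== PORT A =====
def iguales (primeraLista : List String) (segundaLista : List String) : Bool :=
  let r := false
  let A := primeraLista.foldl (fun acc x => acc ++ (PySem.Str.upper x).toList) ([] : List Char)
  let B := segundaLista.foldl (fun acc x => acc ++ (PySem.Str.upper x).toList) ([] : List Char)
  if A == B then true else r

-- ===== PORT B =====
-- the generator '(c for s in L for c in s)': state = (chars left of the current string, strings left);
-- genNext is Python's next(it, None)
def genNext : List Char × List String → Option (Char × (List Char × List String))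
  | (c :: cs, rs) => some (c, (cs, rs))
  | ([], s :: rs) => genNext (s.toList, rs)
  | ([], []) => none
termination_by g => g.2.length

-- weight of a generator state: total characters it will still yield
def genWt (g : List Char × List String) : Nat :=
  g.1.length + (g.2.map String.length).sum

lemma genNext_wt : ∀ (g : List Char × List String) (c : Char) (g' : List Char × List String),
    genNext g = some (c, g') → genWt g' < genWt g := by
  intro g
  induction g using genNext.induct with
  | case1 c cs rs =>
    intro c' g' h
    simp only [genNext] at h
    cases h
    simp [genWt]
  | case2 s rs ih =>
    intro c' g' h
    rw [genNext] at h
    have := ih c' g' h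
    simp only [genWt, List.map_cons, List.sum_cons, String.length] at *
    omega
  | case3 =>
    intro c' g' h
    simp [genNext] at h

-- the while-loop of Source B
def ciLoop (ga gb : List Char × List String) : Bool :=
  match ha : genNext ga, hb : genNext gb with
  | none, none => true
  | none, some _ => false
  | some _, none => false
  | some (x, ga'), some (y, gb') =>
      if PySem.Chars.upper [x] ≠ PySem.Chars.upper [y] then false
      else ciLoop ga' gb'
termination_by genWt ga + genWt gb
decreasing_by
  have h1 := genNext_wt ga x ga' ha
  have h2 := genNext_wt gb y gb' hb
  omega

def iguales_alt (primeraLista : List String) (segundaLista : List String) : Bool :=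
  ciLoop ([], primeraLista) ([], segundaLista)

-- ===== PRECONDITION & SPEC =====
def Spec_iguales (primeraLista : List String) (segundaLista : List String) (out : Bool) : Prop := out = iguales_alt primeraLista segundaLista
instance (primeraLista : List String) (segundaLista : List String) (out : Bool) : Decidable (Spec_iguales primeraLista segundaLista out) := by unfold Spec_iguales; infer_instance

-- ===== CLAIM (what is proved, stated in full; the proofs are below) =====
def Claim_equal_iguales : Prop := ∀ (primeraLista : List String) (segundaLista : List String), Dom_iguales primeraLista segundaLista → Spec_iguales primeraLista segundaLista (iguales primeraLista segundaLista)

-- ===== LEMMAS AND PROOFS =====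

-- the character stream a generator state will still yield
def toStream (g : List Char × List String) : List Char :=
  g.1 ++ g.2.flatMap String.toList

lemma genNext_none_iff (g : List Char × List String) :
    genNext g = none ↔ toStream g = [] := by
  induction g using genNext.induct with
  | case1 c cs rs => simp [genNext, toStream]
  | case2 s rs ih => rw [genNext]; simpa [toStream] using ih
  | case3 => simp [genNext, toStream]

lemma genNext_some_stream : ∀ (g : List Char × List String) (c : Char) (g' : List Char × List String),
    genNext g = some (c, g') → toStream g = c :: toStream g' := by
  intro g
  induction g using genNext.induct with
  | case1 c cs rs =>
    intro c' g' h
    simp only [genNext, Option.some.injEq, Prod.mk.injEq] at h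
    obtain ⟨h1, h2⟩ := h
    subst h1 h2
    simp [toStream]
  | case2 s rs ih =>
    intro c' g' h
    rw [genNext] at h
    have := ih c' g' h
    simpa [toStream] using this
  | case3 =>
    intro c' g' h
    simp [genNext] at h

lemma ciLoop_eq_map (ga gb : List Char × List String) :
    ciLoop ga gb
      = ((toStream ga).map PySem.Chars.upperChar == (toStream gb).map PySem.Chars.upperChar) := by
  rw [ciLoop]
  cases ha : genNext ga with
  | none =>
    cases hb : genNext gb with
    | none =>
      rw [(genNext_none_iff ga).mp ha, (genNext_none_iff gb).mp hb]
      simp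
    | some p =>
      obtain ⟨y, gb'⟩ := p
      rw [(genNext_none_iff ga).mp ha, genNext_some_stream gb y gb' hb]
      simp
  | some p =>
    obtain ⟨x, ga'⟩ := p
    cases hb : genNext gb with
    | none =>
      rw [genNext_some_stream ga x ga' ha, (genNext_none_iff gb).mp hb]
      simp
    | some q =>
      obtain ⟨y, gb'⟩ := q
      rw [genNext_some_stream ga x ga' ha, genNext_some_stream gb y gb' hb]
      by_cases hxy : PySem.Chars.upper [x] ≠ PySem.Chars.upper [y]
      · simp only [if_pos hxy]
        have hne : PySem.Chars.upperChar x ≠ PySem.Chars.upperChar y := by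
          intro h; exact hxy (by simp [PySem.Chars.upper, h])
        simp [hne]
      · simp only [hxy, if_false]
        have hx : PySem.Chars.upperChar x = PySem.Chars.upperChar y := by
          by_contra h
          exact hxy (by simp [PySem.Chars.upper]; exact fun hh => absurd hh h)
        rw [ciLoop_eq_map ga' gb']
        simp [hx]
termination_by genWt ga + genWt gb
decreasing_by
  have h1 := genNext_wt ga x ga' ha
  have h2 := genNext_wt gb y gb' hb
  omega

lemma foldl_upper_eq (p : List String) (acc : List Char) :
    p.foldl (fun a x => a ++ (PySem.Str.upper x).toList) acc
      = acc ++ (p.flatMap String.toList).map PySem.Chars.upperChar := by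
  induction p generalizing acc with
  | nil => simp
  | cons x xs ih =>
    simp only [List.foldl_cons, ih, List.flatMap_cons]
    simp [PySem.Str.toList_upper, PySem.Chars.upper, List.append_assoc]

-- ===== VERDICT (by name: the statement is the Claim_ definition above) =====
theorem iguales_spec : Claim_equal_iguales := by
  intro p q _
  unfold Spec_iguales iguales iguales_alt
  rw [ciLoop_eq_map]
  simp only [foldl_upper_eq, List.nil_append, toStream]
  rw [Bool.eq_iff_iff]
  simp
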